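-- pv_equiv track=rewrite | github.com/Fwxzxh/proyecto_4 | Main.py | sumatoria
-- ===== SOURCE A (Python) =====
-- def sumatoria(p, n, eje): # p= lista n=potencia eje=elegir si sumar x o y (true o false)
--     suma = 0
--     for i in range(len(p)):
--         if eje:
--             if (i % 2) == 0:
--                 suma += p[i]**n
--         else:
--             if (i % 2) != 0:
--                 if n == 0:
--                     suma += p[i]
--                 else:
--                     suma += (p[i-1] ** n) * (p[i])
--     return suma
-- ===== SOURCE B (Python) =====
-- def sumatoria(p, n, eje):
--     total = 0
--     i = 0
--     m = len(p)
--     if eje: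
--         while i < m:
--             total += p[i] ** n
--             i += 2
--     elif n == 0:
--         while i + 1 < m:
--             total += p[i + 1]
--             i += 2
--     else:
--         while i + 1 < m:
--             total += p[i] ** n * p[i + 1]
--             i += 2
--     return total
-- ===== Notes on version B (the rewrite author's own statement) =====
-- stated objective: alternative
-- what changed: A scans every index, testing parity and back-referencing p[i-1] inside one loop; B hoists the eje/n branching out of the loop and runs one of three specialised stride-2 loops over only the relevant (even,odd) positions.
-- outside the precondition, e.g. on sumatoria([], -1, True): A returns 0, B returns 0; on sumatoria([2], -1, True): A returns 0.5, B returns 0.5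
import Mathlib
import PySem

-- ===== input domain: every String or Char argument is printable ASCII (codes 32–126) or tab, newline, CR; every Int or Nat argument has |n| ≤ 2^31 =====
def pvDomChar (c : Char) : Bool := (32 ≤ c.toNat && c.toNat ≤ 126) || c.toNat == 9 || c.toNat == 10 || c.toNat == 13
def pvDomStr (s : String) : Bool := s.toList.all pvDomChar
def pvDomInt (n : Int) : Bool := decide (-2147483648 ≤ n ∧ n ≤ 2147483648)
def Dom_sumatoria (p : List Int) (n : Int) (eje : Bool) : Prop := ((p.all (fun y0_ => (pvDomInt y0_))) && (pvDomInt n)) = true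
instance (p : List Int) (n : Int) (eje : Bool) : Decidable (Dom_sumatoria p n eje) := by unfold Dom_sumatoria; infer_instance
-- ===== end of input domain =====

-- B replaces A's full index scan (parity test + back-reference on every index) by three
-- specialised stride-2 loops with the eje/n branching hoisted out of the loop (alternative decomposition).

-- ===== PORT A =====
-- Literal port of A's single loop over range(len(p)); indices produced by the loop are
-- in range and non-negative (i-1 is only read when i % 2 ≠ 0, i.e. i ≥ 1), so getD is exact.
def sumatoria (p : List Int) (n : Int) (eje : Bool) : Int :=
  (List.range p.length).foldl
    (fun suma i =>
      if eje then
        if i % 2 == 0 then suma + p.getD i 0 ^ n.toNat else suma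
      else
        if i % 2 != 0 then
          if n == 0 then suma + p.getD i 0
          else suma + p.getD (i - 1) 0 ^ n.toNat * p.getD i 0
        else suma)
    0

-- ===== PORT B =====
-- the three while-loops of Source B; i, m are the Python loop index and len(p)
def sumatoriaLoopE (p : List Int) (nn m i : Nat) (total : Int) : Int :=
  if _h : i < m then sumatoriaLoopE p nn m (i + 2) (total + p.getD i 0 ^ nn) else total
termination_by m - i

def sumatoriaLoopO (p : List Int) (m i : Nat) (total : Int) : Int :=
  if _h : i + 1 < m then sumatoriaLoopO p m (i + 2) (total + p.getD (i + 1) 0) else total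
termination_by m - i

def sumatoriaLoopP (p : List Int) (nn m i : Nat) (total : Int) : Int :=
  if _h : i + 1 < m then
    sumatoriaLoopP p nn m (i + 2) (total + p.getD i 0 ^ nn * p.getD (i + 1) 0)
  else total
termination_by m - i

def sumatoria_alt (p : List Int) (n : Int) (eje : Bool) : Int :=
  if eje then sumatoriaLoopE p n.toNat p.length 0 0
  else if n == 0 then sumatoriaLoopO p p.length 0 0
  else sumatoriaLoopP p n.toNat p.length 0 0

-- ===== PRECONDITION & SPEC =====
-- Pre_ excludes negative exponents n, where Python's ** leaves the declared int type
-- (a float, or ZeroDivisionError on base 0); it does not otherwise restrict the inputs.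
def Pre_sumatoria (p : List Int) (n : Int) (eje : Bool) : Prop := 0 ≤ n
instance (p : List Int) (n : Int) (eje : Bool) : Decidable (Pre_sumatoria p n eje) := by
  unfold Pre_sumatoria; infer_instance
def pvWitness_sumatoria : List Int × Int × Bool := ([1, -2, 3, 4], 2, false)

def Spec_sumatoria (p : List Int) (n : Int) (eje : Bool) (out : Int) : Prop := out = sumatoria_alt p n eje
instance (p : List Int) (n : Int) (eje : Bool) (out : Int) : Decidable (Spec_sumatoria p n eje out) := by unfold Spec_sumatoria; infer_instance

-- ===== CLAIM (what is proved, stated in full; the proofs are below) =====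
def Claim_equal_sumatoria : Prop := ∀ (p : List Int) (n : Int) (eje : Bool), Dom_sumatoria p n eje → Pre_sumatoria p n eje → Spec_sumatoria p n eje (sumatoria p n eje)

-- ===== LEMMAS AND PROOFS =====

-- common reference: p processed two elements at a time
def pairRef (nn : Nat) (n : Int) (eje : Bool) : List Int → Int
  | [] => 0
  | [x] => if eje then x ^ nn else 0
  | x :: y :: t => (if eje then x ^ nn else if n == 0 then y else x ^ nn * y) + pairRef nn n eje t

-- A's loop body adds a per-index term
def aTerm (p : List Int) (nn : Nat) (n : Int) (eje : Bool) (i : Nat) : Int :=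
  if eje then
    if i % 2 == 0 then p.getD i 0 ^ nn else 0
  else
    if i % 2 != 0 then
      if n == 0 then p.getD i 0 else p.getD (i - 1) 0 ^ nn * p.getD i 0
    else 0

theorem foldl_add_sum (t : Nat → Int) (l : List Nat) (s : Int) :
    l.foldl (fun s i => s + t i) s = s + (l.map t).sum := by
  induction l generalizing s with
  | nil => simp
  | cons a l ih => simp [ih, add_assoc]

theorem sumatoria_eq_sum (p : List Int) (n : Int) (eje : Bool) :
    sumatoria p n eje = ((List.range p.length).map (aTerm p n.toNat n eje)).sum := by
  unfold sumatoria
  rw [show (fun (suma : Int) (i : Nat) =>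
      if eje then
        if i % 2 == 0 then suma + p.getD i 0 ^ n.toNat else suma
      else
        if i % 2 != 0 then
          if n == 0 then suma + p.getD i 0
          else suma + p.getD (i - 1) 0 ^ n.toNat * p.getD i 0
        else suma) = fun suma i => suma + aTerm p n.toNat n eje i from by
    funext suma i
    simp only [aTerm]
    split_ifs <;> simp]
  rw [foldl_add_sum]
  simp

theorem aTerm_shift (x y : Int) (t : List Int) (nn : Nat) (n : Int) (eje : Bool) (i : Nat) :
    aTerm (x :: y :: t) nn n eje (2 + i) = aTerm t nn n eje i := by
  unfold aTerm
  have h2 : (2 + i) % 2 = i % 2 := by omega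
  have hg : (x :: y :: t)[2 + i]? = t[i]? := by
    simp [show 2 + i = i + 1 + 1 from by omega]
  by_cases hpar : i % 2 = 0
  · simp [h2, hpar, hg]
  · have hi1 : i ≥ 1 := by omega
    have hg1 : (x :: y :: t)[1 + i]? = t[i - 1]? := by
      rcases Nat.exists_eq_add_of_le hi1 with ⟨j, rfl⟩
      simp [show 1 + (1 + j) = j + 1 + 1 from by omega, show 1 + j - 1 = j from by omega]
    simp [h2, hpar, hg, hg1]

theorem sumatoria_eq_pairRef (p : List Int) (n : Int) (eje : Bool) :
    sumatoria p n eje = pairRef n.toNat n eje p := by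
  induction p using pairRef.induct eje with
  | case1 =>
    simp [sumatoria_eq_sum, pairRef]
  | case2 x _ =>
    simp [sumatoria_eq_sum, pairRef, aTerm, List.range_succ]
  | case3 x _ =>
    simp [sumatoria_eq_sum, pairRef, aTerm, List.range_succ]
  | case4 x y t ih =>
    rw [sumatoria_eq_sum] at ih ⊢
    have hlen : (x :: y :: t).length = 2 + t.length := by simp; omega
    rw [hlen, List.range_add, List.map_append, List.sum_append]
    have hmap : (List.map (2 + ·) (List.range t.length)).map (aTerm (x :: y :: t) n.toNat n eje)
        = (List.range t.length).map (aTerm t n.toNat n eje) := by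
      rw [List.map_map]
      exact List.map_congr_left (fun i _ => aTerm_shift x y t n.toNat n eje i)
    rw [hmap, ih, pairRef]
    have h0 : aTerm (x :: y :: t) n.toNat n eje 0 = (if eje then x ^ n.toNat else 0) := by
      simp [aTerm]
    have h1 : aTerm (x :: y :: t) n.toNat n eje 1
        = (if eje then 0 else if n == 0 then y else x ^ n.toNat * y) := by
      simp [aTerm]
    simp [List.range_succ, h0, h1]
    split_ifs <;> ring

-- pairRef steps two positions forward inside / at the boundary of p
theorem pairRef_drop_stepE (p : List Int) (nn : Nat) (n : Int) (i : Nat) (h : i < p.length) :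
    pairRef nn n true (p.drop i) = p.getD i 0 ^ nn + pairRef nn n true (p.drop (i + 2)) := by
  rw [List.drop_eq_getElem_cons h]
  by_cases h1 : i + 1 < p.length
  · rw [List.drop_eq_getElem_cons h1]
    simp [pairRef, show i + 1 + 1 = i + 2 from rfl, List.getElem?_eq_getElem h]
  · have : p.drop (i + 1) = [] := List.drop_eq_nil_of_le (by omega)
    have h2 : p.drop (i + 2) = [] := List.drop_eq_nil_of_le (by omega)
    rw [this, h2]
    simp [pairRef, List.getElem?_eq_getElem h]

theorem pairRef_drop_stepO (p : List Int) (nn : Nat) (n : Int) (i : Nat) (h : i + 1 < p.length) :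
    pairRef nn n false (p.drop i)
      = (if n == 0 then p.getD (i + 1) 0 else p.getD i 0 ^ nn * p.getD (i + 1) 0)
        + pairRef nn n false (p.drop (i + 2)) := by
  have hi : i < p.length := by omega
  rw [List.drop_eq_getElem_cons hi, List.drop_eq_getElem_cons h]
  simp [pairRef, show i + 1 + 1 = i + 2 from rfl, List.getElem?_eq_getElem h,
    List.getElem?_eq_getElem hi]

theorem pairRef_drop_end (p : List Int) (nn : Nat) (n : Int) (i : Nat) (h : ¬ i + 1 < p.length) :
    pairRef nn n false (p.drop i) = 0 := by
  by_cases hi : i < p.length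
  · rw [List.drop_eq_getElem_cons hi]
    have : p.drop (i + 1) = [] := List.drop_eq_nil_of_le (by omega)
    rw [this]; simp [pairRef]
  · rw [List.drop_eq_nil_of_le (by omega)]; simp [pairRef]

theorem loopE_eq (p : List Int) (nn : Nat) (n : Int) (i : Nat) (total : Int) :
    sumatoriaLoopE p nn p.length i total = total + pairRef nn n true (p.drop i) := by
  induction i, total using sumatoriaLoopE.induct p nn p.length with
  | case1 i total h ih =>
    rw [sumatoriaLoopE, dif_pos h, ih, pairRef_drop_stepE p nn n i h]
    ring
  | case2 i total h =>
    rw [sumatoriaLoopE, dif_neg h, List.drop_eq_nil_of_le (by omega)]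
    simp [pairRef]

theorem loopO_eq (p : List Int) (n : Int) (i : Nat) (total : Int) (hn : n == 0) :
    sumatoriaLoopO p p.length i total = total + pairRef 0 n false (p.drop i) := by
  induction i, total using sumatoriaLoopO.induct p p.length with
  | case1 i total h ih =>
    rw [sumatoriaLoopO, dif_pos h, ih, pairRef_drop_stepO p 0 n i h]
    simp [hn]; ring
  | case2 i total h =>
    rw [sumatoriaLoopO, dif_neg h, pairRef_drop_end p 0 n i h]
    simp

theorem loopP_eq (p : List Int) (nn : Nat) (n : Int) (i : Nat) (total : Int) (hn : ¬ n == 0) :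
    sumatoriaLoopP p nn p.length i total = total + pairRef nn n false (p.drop i) := by
  induction i, total using sumatoriaLoopP.induct p nn p.length with
  | case1 i total h ih =>
    rw [sumatoriaLoopP, dif_pos h, ih, pairRef_drop_stepO p nn n i h]
    simp [hn]; ring
  | case2 i total h =>
    rw [sumatoriaLoopP, dif_neg h, pairRef_drop_end p nn n i h]
    simp

theorem sumatoria_alt_eq_pairRef (p : List Int) (n : Int) (eje : Bool) :
    sumatoria_alt p n eje = pairRef n.toNat n eje p := by
  unfold sumatoria_alt
  by_cases he : eje
  · rw [if_pos he, loopE_eq p n.toNat n 0 0, he]; simp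
  · rw [if_neg he]
    by_cases hn : n == 0
    · rw [if_pos hn, loopO_eq p n 0 0 hn]
      have : n.toNat = 0 := by simp at hn; omega
      simp [Bool.not_eq_true] at he
      simp [this, he]
    · rw [if_neg hn, loopP_eq p n.toNat n 0 0 hn]
      simp [Bool.not_eq_true] at he
      simp [he]

-- ===== VERDICT (by name: the statement is the Claim_ definition above) =====
theorem sumatoria_spec : Claim_equal_sumatoria := by
  intro p n eje _ _
  unfold Spec_sumatoria
  rw [sumatoria_eq_pairRef, sumatoria_alt_eq_pairRef]
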